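-- pv_equiv track=rewrite | github.com/luchiago/advent-of-code-2022 | day-5/main.py | queue_pkgs
-- ===== SOURCE A (Python) =====
-- def queue_pkgs(list_of_pkgs_indexes: list):
--     sequence = list_of_pkgs_indexes.pop()
--     organized = {obj[0]: [] for obj in sequence}
--     for obj in list_of_pkgs_indexes:
--         for o in obj:
--             organized[o[0]].append(o[1])
--     organized_with_indexes = {}
--     i = 0
--     for key, value in organized.items():
--         value.reverse()
--         organized_with_indexes[i] = value
--         i += 1
--     return organized_with_indexes
-- ===== SOURCE B (Python) =====
-- def queue_pkgs(list_of_pkgs_indexes: list):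
--     sequence = list_of_pkgs_indexes.pop()
--     keys = list(dict.fromkeys(obj[0] for obj in sequence))
--     flat_rev = [o for obj in reversed(list_of_pkgs_indexes) for o in reversed(obj)]
--     return {i: [o[1] for o in flat_rev if o[0] == k] for i, k in enumerate(keys)}
-- ===== Notes on version B (the rewrite author's own statement) =====
-- stated objective: alternative
-- what changed: Replaces A's single-pass dict grouping (append each value forward, then reverse every list and re-index item by item) with a dict-free formulation: an ordered dedup of the popped row's heads, one flattened reversed pass over the remaining rows, and a per-key filter comprehension that yields each stack already in final order.
import Mathlib
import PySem

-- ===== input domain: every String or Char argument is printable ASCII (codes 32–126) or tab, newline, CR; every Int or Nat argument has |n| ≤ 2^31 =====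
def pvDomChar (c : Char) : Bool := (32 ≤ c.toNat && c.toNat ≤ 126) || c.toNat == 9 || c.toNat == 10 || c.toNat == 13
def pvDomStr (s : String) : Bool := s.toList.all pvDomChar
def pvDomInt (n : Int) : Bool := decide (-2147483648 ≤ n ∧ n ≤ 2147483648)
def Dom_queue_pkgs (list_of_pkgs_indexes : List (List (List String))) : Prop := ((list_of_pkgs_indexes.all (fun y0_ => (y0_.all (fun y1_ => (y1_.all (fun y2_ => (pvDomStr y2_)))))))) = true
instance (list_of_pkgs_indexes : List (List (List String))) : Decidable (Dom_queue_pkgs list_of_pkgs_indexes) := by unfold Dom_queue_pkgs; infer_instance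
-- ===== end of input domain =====

-- B replaces A's dict-grouping pass (append forward, then reverse every value list) by a dict-free
-- per-key comprehension over the reversed flattened rows, keyed by the ordered dedup of the popped row.
-- Like A, the Python B pops the last element off its argument (same in-place mutation); equivalence is about the return value.

-- ===== PORT A =====
def queue_pkgs (list_of_pkgs_indexes : List (List (List String))) : List (Int × List String) :=
  -- sequence = list_of_pkgs_indexes.pop()
  let sequence := list_of_pkgs_indexes.getLastD []
  let rest := list_of_pkgs_indexes.dropLast
  -- organized = {obj[0]: [] for obj in sequence}
  let organized : PySem.Dict String (List String) :=
    sequence.foldl (fun d obj => d.insert (PySem.List.pyGetD obj 0 "") ([] : List String)) PySem.Dict.empty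
  -- for obj in list_of_pkgs_indexes: for o in obj: organized[o[0]].append(o[1])
  let organized2 :=
    rest.foldl (fun d obj =>
      obj.foldl (fun d o =>
        d.modify (PySem.List.pyGetD o 0 "") [] (fun v => v ++ [PySem.List.pyGetD o 1 ""])) d) organized
  -- i = 0; for key, value in organized.items(): value.reverse(); organized_with_indexes[i] = value; i += 1
  (organized2.items.foldl
    (fun (p : Int × List (Int × List String)) kv => (p.1 + 1, p.2 ++ [(p.1, kv.2.reverse)]))
    ((0 : Int), ([] : List (Int × List String)))).2

-- ===== PORT B =====
def queue_pkgs_alt (list_of_pkgs_indexes : List (List (List String))) : List (Int × List String) :=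
  -- sequence = list_of_pkgs_indexes.pop()
  let sequence := list_of_pkgs_indexes.getLastD []
  let rest := list_of_pkgs_indexes.dropLast
  -- keys = list(dict.fromkeys(obj[0] for obj in sequence))
  let keys := PySem.List.dedup (sequence.map (fun obj => PySem.List.pyGetD obj 0 ""))
  -- flat_rev = [o for obj in reversed(rest) for o in reversed(obj)]
  let flatRev := rest.reverse.flatMap (fun obj => obj.reverse)
  -- {i: [o[1] for o in flat_rev if o[0] == k] for i, k in enumerate(keys)}
  (PySem.List.enumerate keys 0).map (fun p =>
    (p.1, (flatRev.filter (fun o => PySem.List.pyGetD o 0 "" == p.2)).map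
            (fun o => PySem.List.pyGetD o 1 "")))

-- ===== PRECONDITION & SPEC =====
-- Pre_ excludes exactly the inputs where Python A raises: the empty list (pop → IndexError), an empty
-- sub-list in the popped row (obj[0] → IndexError), a row entry shorter than 2 (o[0]/o[1] → IndexError),
-- or a row entry whose first element is not a key of the popped row (KeyError).
def Pre_queue_pkgs (list_of_pkgs_indexes : List (List (List String))) : Prop :=
  list_of_pkgs_indexes ≠ [] ∧
  (∀ o ∈ list_of_pkgs_indexes.getLastD [], o ≠ []) ∧
  (∀ row ∈ list_of_pkgs_indexes.dropLast, ∀ o ∈ row,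
    2 ≤ o.length ∧
    o.getD 0 "" ∈ (list_of_pkgs_indexes.getLastD []).map (fun s => s.getD 0 ""))
instance (list_of_pkgs_indexes : List (List (List String))) : Decidable (Pre_queue_pkgs list_of_pkgs_indexes) := by unfold Pre_queue_pkgs; infer_instance

def pvWitness_queue_pkgs : List (List (List String)) :=
  [[["a", "x"], ["b", "y"]], [["b", "q"], ["a", "p"]], [["a"], ["b"]]]

def Spec_queue_pkgs (list_of_pkgs_indexes : List (List (List String))) (out : List (Int × List String)) : Prop := out = queue_pkgs_alt list_of_pkgs_indexes
instance (list_of_pkgs_indexes : List (List (List String))) (out : List (Int × List String)) : Decidable (Spec_queue_pkgs list_of_pkgs_indexes out) := by unfold Spec_queue_pkgs; infer_instance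

-- ===== CLAIM (what is proved, stated in full; the proofs are below) =====
def Claim_equal_queue_pkgs : Prop := ∀ (list_of_pkgs_indexes : List (List (List String))), Dom_queue_pkgs list_of_pkgs_indexes → Pre_queue_pkgs list_of_pkgs_indexes → Spec_queue_pkgs list_of_pkgs_indexes (queue_pkgs list_of_pkgs_indexes)

-- ===== LEMMAS AND PROOFS =====

-- After A's comprehension {obj[0]: [] for obj in sequence}, every value (and every default) is [].
lemma pv_getD_foldl_insert_nil (seq : List (List String)) (d : PySem.Dict String (List String))
    (hd : ∀ k, d.getD k [] = []) (k : String) :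
    (seq.foldl (fun d obj => d.insert (PySem.List.pyGetD obj 0 "") ([] : List String)) d).getD k [] = [] := by
  induction seq generalizing d with
  | nil => exact hd k
  | cons a t ih =>
      refine ih _ (fun k' => ?_)
      rw [PySem.Dict.getD_insert]
      split <;> [rfl; exact hd k']

-- PySem.Set.update adds nothing when every new element is already present.
lemma pv_set_update_of_subset (l : List String) (s : PySem.Set String)
    (h : ∀ x ∈ l, x ∈ s) : PySem.Set.update s l = s := by
  induction l generalizing s with
  | nil => rfl
  | cons a t ih =>
      have ha : PySem.Set.add s a = s := by
        simp [PySem.Set.add, PySem.Set.contains, h a (by simp)]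
      show PySem.Set.update (PySem.Set.add s a) t = s
      rw [ha]
      exact ih s (fun x hx => h x (by simp [hx]))

-- A's final loop builds exactly the enumeration of the reversed value lists.
lemma pv_foldl_enumerate (items : List (String × List String)) :
    ∀ (i : Int) (acc : List (Int × List String)),
    (items.foldl
      (fun (p : Int × List (Int × List String)) kv => (p.1 + 1, p.2 ++ [(p.1, kv.2.reverse)]))
      (i, acc)).2
    = acc ++ PySem.List.enumerate (items.map (fun kv => kv.2.reverse)) i := by
  induction items with
  | nil => intro i acc; simp [PySem.List.enumerate_nil]
  | cons a t ih =>
      intro i acc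
      simp only [List.foldl_cons, List.map_cons, PySem.List.enumerate_cons, ih]
      simp

-- enumerate commutes with mapping the payload.
lemma pv_enumerate_map {α β : Type} (f : α → β) (xs : List α) :
    ∀ (s : Int), PySem.List.enumerate (xs.map f) s
      = (PySem.List.enumerate xs s).map (fun p => (p.1, f p.2)) := by
  induction xs with
  | nil => intro s; simp [PySem.List.enumerate_nil]
  | cons a t ih => intro s; simp [PySem.List.enumerate_cons, ih]

-- The nested append loop of A, flattened (cites List.foldl_flatMap).
lemma pv_foldl_nested (rest : List (List (List String))) (d : PySem.Dict String (List String)) :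
    rest.foldl (fun d obj =>
      obj.foldl (fun d o =>
        d.modify (PySem.List.pyGetD o 0 "") [] (fun v => v ++ [PySem.List.pyGetD o 1 ""])) d) d
    = (rest.flatMap id).foldl (fun d o =>
        d.modify (PySem.List.pyGetD o 0 "") [] (fun v => v ++ [PySem.List.pyGetD o 1 ""])) d := by
  rw [List.foldl_flatMap]
  simp only [id]

-- Value of A's grouping dict at any key.
lemma pv_dictA_getD (flat : List (List String)) (d : PySem.Dict String (List String)) (k : String) :
    (flat.foldl (fun d o =>
        d.modify (PySem.List.pyGetD o 0 "") [] (fun v => v ++ [PySem.List.pyGetD o 1 ""])) d).getD k []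
    = d.getD k [] ++
      (flat.filter (fun o => PySem.List.pyGetD o 0 "" == k)).map (fun o => PySem.List.pyGetD o 1 "") := by
  have hmap : flat.foldl (fun d o =>
        d.modify (PySem.List.pyGetD o 0 "") [] (fun v => v ++ [PySem.List.pyGetD o 1 ""])) d
      = (flat.map (fun o => (PySem.List.pyGetD o 0 "", PySem.List.pyGetD o 1 ""))).foldl
          (fun d p => d.modify p.1 [] (fun v => v ++ [p.2])) d := by
    rw [List.foldl_map]
  rw [hmap, PySem.Dict.getD_foldl_modify_append, List.filter_map, List.map_map]
  rfl

-- ===== VERDICT (by name: the statement is the Claim_ definition above) =====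
theorem queue_pkgs_spec : Claim_equal_queue_pkgs := by
  intro l _ hpre
  obtain ⟨hne, hseqne, hrest⟩ := hpre
  unfold Spec_queue_pkgs
  simp only [queue_pkgs, queue_pkgs_alt]
  rw [pv_foldl_nested, pv_foldl_enumerate]
  set seq := l.getLastD [] with hseqdef
  set rest := l.dropLast with hrestdef
  set flat := rest.flatMap id with hflat
  set d0 := seq.foldl (fun d obj => d.insert (PySem.List.pyGetD obj 0 "") ([] : List String)) PySem.Dict.empty with hd0
  set d1 := flat.foldl (fun d o =>
      d.modify (PySem.List.pyGetD o 0 "") [] (fun v => v ++ [PySem.List.pyGetD o 1 ""])) d0 with hd1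
  set keys := PySem.List.dedup (seq.map (fun obj => PySem.List.pyGetD obj 0 "")) with hkeys
  -- keys of the comprehension dict
  have hk0 : d0.keys = keys := by
    have e1 : d0.keys = PySem.Set.update PySem.Dict.empty.keys
        (seq.map (fun obj => PySem.List.pyGetD obj 0 "")) :=
      PySem.Dict.keys_foldl_insert_key seq (fun obj => PySem.List.pyGetD obj 0 "")
        (fun _ _ => []) PySem.Dict.empty
    rw [e1, hkeys, PySem.List.dedup_eq_ofList]
    rfl
  -- keys after the append loop: unchanged (every key seen is already a key)
  have hmemflat : ∀ x ∈ flat.map (fun o => PySem.List.pyGetD o 0 ""), x ∈ keys := by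
    intro x hx
    obtain ⟨o, ho, rfl⟩ := List.mem_map.mp hx
    obtain ⟨row, hrow, horow⟩ := List.mem_flatMap.mp (hflat ▸ ho)
    have := (hrest row hrow o (by simpa using horow)).2
    rw [hkeys]
    have hmem : PySem.List.pyGetD o 0 "" ∈ seq.map (fun obj => PySem.List.pyGetD obj 0 "") := by
      simpa [PySem.List.pyGetD_zero] using this
    exact (PySem.List.mem_dedup _ _).mpr hmem
  have hk1 : d1.keys = keys := by
    have e1 : d1.keys = PySem.Set.update d0.keys
        (flat.map (fun o => PySem.List.pyGetD o 0 "")) :=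
      PySem.Dict.keys_foldl_modify_key flat (fun o => PySem.List.pyGetD o 0 "") []
        (fun _ o => fun v => v ++ [PySem.List.pyGetD o 1 ""]) d0
    rw [e1, hk0]
    exact pv_set_update_of_subset _ _ hmemflat
  have hnodup : keys.Nodup := PySem.List.nodup_dedup _
  -- items of the final dict
  have hitems : d1.items = keys.map (fun k => (k, d1.getD k [])) := by
    have := PySem.Dict.items_eq_map_keys d1 (by rw [hk1]; exact hnodup) ([] : List String)
    rwa [hk1] at this
  have hval : ∀ k, d1.getD k []
      = (flat.filter (fun o => PySem.List.pyGetD o 0 "" == k)).map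
          (fun o => PySem.List.pyGetD o 1 "") := by
    intro k
    rw [hd1, pv_dictA_getD, hd0, pv_getD_foldl_insert_nil _ _ (fun k => PySem.Dict.getD_empty _ _)]
    simp
  rw [hitems, List.map_map]
  have hfun : ((fun kv : String × List String => kv.2.reverse) ∘ fun k => (k, d1.getD k []))
      = fun k => ((flat.filter (fun o => PySem.List.pyGetD o 0 "" == k)).map
          (fun o => PySem.List.pyGetD o 1 "")).reverse := by
    funext k
    simp [Function.comp, hval k]
  rw [hfun, pv_enumerate_map, List.nil_append]
  -- right-hand side: the reversed flattened rows are flat.reverse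
  have hfr : rest.reverse.flatMap (fun obj => obj.reverse) = flat.reverse := by
    rw [hflat, List.reverse_flatMap]
    rfl
  rw [hfr]
  apply List.map_congr_left
  intro p _
  rw [List.filter_reverse, List.map_reverse]
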